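-- pv_equiv track=rewrite | github.com/nealcaren/florida-sociology | scripts/aligner.py | _words_to_text
-- ===== SOURCE A (Python) =====
-- def _words_to_text(words: list[str], break_positions: set[int], offset: int = 0) -> str:
--     """Join words into text, inserting \\n\\n at original paragraph boundaries."""
--     if not words:
--         return ""
--     parts = []
--     for i, word in enumerate(words):
--         if (offset + i) in break_positions and parts:
--             parts.append("\n\n")
--         elif parts:
--             parts.append(" ")
--         parts.append(word)
--     return "".join(parts)
-- ===== SOURCE B (Python) =====
-- def _words_to_text(words: list[str], break_positions: set[int], offset: int = 0) -> str:
--     """Join words into text, inserting \n\n at original paragraph boundaries.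
--
--     Builds the paragraph groups explicitly in one pass, then joins at two
--     levels: words with " " inside a group, groups with "\n\n".
--     """
--     groups = []
--     for i, word in enumerate(words):
--         if i > 0 and (offset + i) in break_positions:
--             groups.append([word])
--         elif groups:
--             groups[-1].append(word)
--         else:
--             groups.append([word])
--     return "\n\n".join(" ".join(g) for g in groups)
-- ===== Notes on version B (the rewrite author's own statement) =====
-- stated objective: alternative
-- what changed: B builds the paragraph groups explicitly in one pass and joins at two levels (" ".join inside a group, "\n\n".join across groups) instead of A's single pass that emits interleaved separator tokens into one flat list before a single "".join.
import Mathlib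
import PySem

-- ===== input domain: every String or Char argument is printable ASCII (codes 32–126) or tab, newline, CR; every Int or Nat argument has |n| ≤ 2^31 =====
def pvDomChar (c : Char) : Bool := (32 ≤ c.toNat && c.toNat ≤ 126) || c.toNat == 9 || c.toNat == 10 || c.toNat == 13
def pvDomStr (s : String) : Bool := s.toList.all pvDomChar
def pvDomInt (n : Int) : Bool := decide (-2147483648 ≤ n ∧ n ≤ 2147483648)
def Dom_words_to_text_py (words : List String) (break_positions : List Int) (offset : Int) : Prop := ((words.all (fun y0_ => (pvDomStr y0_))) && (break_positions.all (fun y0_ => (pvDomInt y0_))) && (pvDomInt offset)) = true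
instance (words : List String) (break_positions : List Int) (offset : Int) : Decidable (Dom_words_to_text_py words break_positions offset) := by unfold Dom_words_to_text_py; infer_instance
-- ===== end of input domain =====

-- B joins at two levels (words with " " inside explicitly built paragraph groups, groups with "\n\n")
-- instead of A's single pass emitting interleaved separator tokens; objective: alternative decomposition, same cost.


-- ===== PORT A =====
-- literal port of A: one pass over enumerate(words), appending "\n\n" / " " separator
-- tokens into `parts` before each word, then "".join(parts)
def words_to_text_py (words : List String) (break_positions : List Int) (offset : Int) : String :=
  if words = [] then ""
  else
    let parts :=
      (PySem.List.enumerate words).foldl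
        (fun parts iw =>
          (if break_positions.contains (offset + iw.1) ∧ parts ≠ [] then parts ++ ["\n\n"]
           else if parts ≠ [] then parts ++ [" "]
           else parts) ++ [iw.2])
        []
    PySem.Str.join "" parts

-- ===== PORT B =====
-- literal port of B: build the paragraph groups in one pass, then join at two levels
def words_to_text_py_alt (words : List String) (break_positions : List Int) (offset : Int) : String :=
  let groups :=
    (PySem.List.enumerate words).foldl
      (fun groups iw =>
        if 0 < iw.1 ∧ break_positions.contains (offset + iw.1) then groups ++ [[iw.2]]
        else if groups ≠ [] then groups.dropLast ++ [groups.getLastD [] ++ [iw.2]]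
        else groups ++ [[iw.2]])
      []
  PySem.Str.join "\n\n" (groups.map (PySem.Str.join " "))

-- ===== PRECONDITION & SPEC =====
def Spec_words_to_text_py (words : List String) (break_positions : List Int) (offset : Int) (out : String) : Prop := out = words_to_text_py_alt words break_positions offset
instance (words : List String) (break_positions : List Int) (offset : Int) (out : String) : Decidable (Spec_words_to_text_py words break_positions offset out) := by unfold Spec_words_to_text_py; infer_instance

-- ===== CLAIM (what is proved, stated in full; the proofs are below) =====
def Claim_equal_words_to_text_py : Prop := ∀ (words : List String) (break_positions : List Int) (offset : Int), Dom_words_to_text_py words break_positions offset → Spec_words_to_text_py words break_positions offset (words_to_text_py words break_positions offset)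

-- ===== LEMMAS AND PROOFS =====

-- sep.join(xs + [y]) = sep.join(xs) + sep + y for nonempty xs
theorem pv_join_concat (sep : String) (xs : List String) (y : String) (h : xs ≠ []) :
    PySem.Str.join sep (xs ++ [y]) = PySem.Str.join sep xs ++ (sep ++ y) := by
  induction xs with
  | nil => cases h rfl
  | cons x t ih =>
    cases t with
    | nil =>
      simp [PySem.Str.join, PySem.Chars.join_singleton, PySem.Chars.join_cons_cons,
        String.ofList_append, String.ofList_toList]
    | cons z t' =>
      have ih' := ih (by simp)
      simp only [List.cons_append] at ih' ⊢
      simp only [PySem.Str.join, List.map_cons, List.map_append, List.map_nil] at ih' ⊢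
      rw [PySem.Chars.join_cons_cons, PySem.Chars.join_cons_cons]
      have hx : PySem.Chars.join sep.toList (z.toList :: (t'.map String.toList ++ [y.toList]))
          = PySem.Chars.join sep.toList (z.toList :: t'.map String.toList) ++ (sep.toList ++ y.toList) := by
        have := congrArg String.toList ih'
        simpa [PySem.Chars.join_cons_cons, List.append_assoc] using this
      rw [hx]
      simp [String.ofList_append, String.ofList_toList, String.append_assoc]

-- appending to the last joined element commutes with the outer join
theorem pv_join_concat_last (sep : String) (xs : List String) (y z : String) :
    PySem.Str.join sep (xs ++ [y ++ z]) = PySem.Str.join sep (xs ++ [y]) ++ z := by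
  cases xs with
  | nil =>
    simp [PySem.Str.join, PySem.Chars.join_singleton, String.ofList_append, String.ofList_toList]
  | cons x t =>
    rw [pv_join_concat sep (x :: t) (y ++ z) (by simp), pv_join_concat sep (x :: t) y (by simp)]
    simp [String.append_assoc]

theorem pv_join_single (sep : String) (y : String) : PySem.Str.join sep [y] = y := by
  simp [PySem.Str.join, PySem.Chars.join_singleton, String.ofList_toList]

theorem pv_enumerate_cons {α : Type} (x : α) (xs : List α) (k : Int) :
    PySem.List.enumerate (x :: xs) k = (k, x) :: PySem.List.enumerate xs (k + 1) := by
  simp [PySem.List.enumerate]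

-- the loop invariant: starting from corresponding nonempty states, A's flat
-- token list and B's group list render to the same string after the rest of the loop
theorem pv_aux (bp : List Int) (off : Int) (ws : List String) :
    ∀ (k : Int), 0 < k → ∀ (parts : List String) (groups : List (List String)),
      parts ≠ [] → groups ≠ [] → (∀ g ∈ groups, g ≠ []) →
      PySem.Str.join "" parts = PySem.Str.join "\n\n" (groups.map (PySem.Str.join " ")) →
      PySem.Str.join ""
        ((PySem.List.enumerate ws k).foldl
          (fun parts iw =>
            (if bp.contains (off + iw.1) ∧ parts ≠ [] then parts ++ ["\n\n"]
             else if parts ≠ [] then parts ++ [" "]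
             else parts) ++ [iw.2]) parts)
      = PySem.Str.join "\n\n"
          (((PySem.List.enumerate ws k).foldl
            (fun groups iw =>
              if 0 < iw.1 ∧ bp.contains (off + iw.1) then groups ++ [[iw.2]]
              else if groups ≠ [] then groups.dropLast ++ [groups.getLastD [] ++ [iw.2]]
              else groups ++ [[iw.2]]) groups).map (PySem.Str.join " ")) := by
  induction ws with
  | nil => intro k hk parts groups hp hg hgs heq; simpa [PySem.List.enumerate] using heq
  | cons w t ih =>
    intro k hk parts groups hp hg hgs heq
    rw [pv_enumerate_cons]
    simp only [List.foldl_cons]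
    by_cases hc : bp.contains (off + k) = true
    · -- break: A appends "\n\n" then w; B starts a new group [w]
      rw [if_pos ⟨hc, hp⟩, if_pos ⟨hk, hc⟩]
      refine ih (k + 1) (by omega) _ _ (by simp) (by simp)
        (by intro g hgmem; rcases List.mem_append.mp hgmem with h | h
            · exact hgs g h
            · simp at h; simp [h]) ?_
      have hA : parts ++ ["\n\n"] ++ [w] = (parts ++ ["\n\n"]) ++ [w] := by simp
      rw [hA, pv_join_concat "" (parts ++ ["\n\n"]) w (by simp),
          pv_join_concat "" parts "\n\n" hp]
      rw [List.map_append, List.map_cons, List.map_nil, pv_join_single,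
          pv_join_concat "\n\n" (groups.map (PySem.Str.join " ")) w (by simpa using hg)]
      rw [heq]
      simp [String.append_assoc]
    · -- no break: A appends " " then w; B appends w to the last group
      rw [if_neg (fun h => hc h.1), if_pos hp, if_neg (fun h => hc h.2), if_pos hg]
      rcases (List.eq_nil_or_concat' groups).resolve_left hg with ⟨gs, g, rfl⟩
      have hgne : g ≠ [] := hgs g (by simp)
      rw [List.dropLast_concat, List.getLastD_concat]
      refine ih (k + 1) (by omega) _ _ (by simp) (by simp)
        (by intro g' hgmem; rcases List.mem_append.mp hgmem with h | h
            · exact hgs g' (by simp [h])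
            · simp at h; simp [h]) ?_
      have hA : parts ++ [" "] ++ [w] = (parts ++ [" "]) ++ [w] := by simp
      rw [hA, pv_join_concat "" (parts ++ [" "]) w (by simp),
          pv_join_concat "" parts " " hp]
      rw [List.map_append, List.map_cons, List.map_nil]
      rcases (List.eq_nil_or_concat' g).resolve_left hgne with ⟨g0, gl, rfl⟩
      have hginner : PySem.Str.join " " ((g0 ++ [gl]) ++ [w])
          = PySem.Str.join " " (g0 ++ [gl]) ++ (" " ++ w) :=
        pv_join_concat " " (g0 ++ [gl]) w (by simp)
      rw [hginner]
      have : PySem.Str.join " " (g0 ++ [gl]) ++ (" " ++ w)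
          = (PySem.Str.join " " (g0 ++ [gl]) ++ " ") ++ w := by
        simp [String.append_assoc]
      rw [this,
          pv_join_concat_last "\n\n" (gs.map (PySem.Str.join " ")) (PySem.Str.join " " (g0 ++ [gl]) ++ " ") w]
      have hsp : PySem.Str.join " " (g0 ++ [gl]) ++ " "
          = PySem.Str.join " " (g0 ++ [gl]) ++ (" " ++ "") := by
        simp
      rw [hsp,
          pv_join_concat_last "\n\n" (gs.map (PySem.Str.join " ")) (PySem.Str.join " " (g0 ++ [gl])) (" " ++ "")]
      rw [heq, List.map_append, List.map_cons, List.map_nil]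
      simp [String.append_assoc]

-- ===== VERDICT (by name: the statement is the Claim_ definition above) =====
theorem words_to_text_py_spec : Claim_equal_words_to_text_py := by
  intro words bp off _
  unfold Spec_words_to_text_py
  cases words with
  | nil =>
    simp [words_to_text_py, words_to_text_py_alt, PySem.List.enumerate, PySem.Str.join,
      PySem.Chars.join, List.intercalate]
  | cons w t =>
    simp only [words_to_text_py, words_to_text_py_alt]
    rw [if_neg (by simp : ¬(w :: t = []))]
    simp only [pv_enumerate_cons, List.foldl_cons]
    rw [if_neg (by simp), if_neg (by simp), if_neg (by simp), if_neg (by simp)]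
    simp only [List.nil_append]
    exact pv_aux bp off t 1 (by norm_num) [w] [[w]] (by simp) (by simp)
      (by intro g h; simp at h; simp [h])
      (by rw [pv_join_single, List.map_cons, List.map_nil, pv_join_single, pv_join_single])
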